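-- pv_equiv track=rewrite | github.com/SHAIKYOUSUF-SVG/mycode | practice/para22.py | remove_second_occurance
-- ===== SOURCE A (Python) =====
-- def remove_second_occurance(data,arg):
--     count=0
--     for i in range(len(data)):
--         if data[i]==arg:
--             count+=1
--             if count==2:
--                 data.pop(i)
--                 break
--     return data
-- ===== SOURCE B (Python) =====
-- def remove_second_occurance(data, arg):
--     idx = [i for i, x in enumerate(data) if x == arg]
--     if len(idx) >= 2:
--         data.pop(idx[1])
--     return data
-- ===== Notes on version B (the rewrite author's own statement) =====
-- stated objective: simpler
-- what changed: Replaces the counter-driven scan with an early break and in-loop pop by a collect-all-matching-indices pass followed by a single indexed pop on the pre-computed index table.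
import Mathlib
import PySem

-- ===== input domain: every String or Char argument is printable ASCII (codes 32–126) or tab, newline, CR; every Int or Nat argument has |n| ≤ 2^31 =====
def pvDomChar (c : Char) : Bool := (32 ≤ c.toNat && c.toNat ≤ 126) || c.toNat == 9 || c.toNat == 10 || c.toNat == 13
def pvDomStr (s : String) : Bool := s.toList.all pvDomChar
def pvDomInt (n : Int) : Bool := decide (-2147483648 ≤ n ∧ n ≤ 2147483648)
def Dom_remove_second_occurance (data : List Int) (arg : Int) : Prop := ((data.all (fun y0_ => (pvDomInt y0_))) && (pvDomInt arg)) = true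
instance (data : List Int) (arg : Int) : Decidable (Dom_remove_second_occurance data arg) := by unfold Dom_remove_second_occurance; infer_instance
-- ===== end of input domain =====

-- B replaces A's counter-driven scan-with-break by collecting all matching indices and
-- popping the second one (objective: simpler). Equivalence is about the return value; both
-- Pythons mutate `data` identically.

-- ===== PORT A =====
-- loop body of `for i in range(len(data))` with the running `count`; `break` = return,
-- `data.pop(i)` ported via PySem.List.pop? (exact: i is a valid non-negative index here)
def pvGoA (arg : Int) (data : List Int) (i count : Nat) : List Int :=
  if h : i < data.length then
    if data[i] == arg then
      if count + 1 == 2 then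
        match PySem.List.pop? data (Int.ofNat i) with
        | some r => r.2
        | none => data
      else pvGoA arg data (i + 1) (count + 1)
    else pvGoA arg data (i + 1) count
  else data
termination_by data.length - i

def remove_second_occurance (data : List Int) (arg : Int) : List Int :=
  pvGoA arg data 0 0

-- ===== PORT B =====
-- idx = [i for i, x in enumerate(data) if x == arg]; if len(idx) >= 2: data.pop(idx[1])
def remove_second_occurance_alt (data : List Int) (arg : Int) : List Int :=
  let idx : List Int := ((PySem.List.enumerate data 0).filter (fun p => p.2 == arg)).map (·.1)
  if 2 ≤ idx.length then
    match PySem.List.pop? data idx[1]! with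
    | some r => r.2
    | none => data
  else data

-- ===== PRECONDITION & SPEC =====
def Spec_remove_second_occurance (data : List Int) (arg : Int) (out : List Int) : Prop := out = remove_second_occurance_alt data arg
instance (data : List Int) (arg : Int) (out : List Int) : Decidable (Spec_remove_second_occurance data arg out) := by unfold Spec_remove_second_occurance; infer_instance

-- ===== CLAIM (what is proved, stated in full; the proofs are below) =====
def Claim_equal_remove_second_occurance : Prop := ∀ (data : List Int) (arg : Int), Dom_remove_second_occurance data arg → Spec_remove_second_occurance data arg (remove_second_occurance data arg)

-- ===== LEMMAS AND PROOFS =====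

-- ===== VERDICT (by name: the statement is the Claim_ definition above) =====
-- positions (from the head) of the occurrences of arg, structurally
def pvOcc (arg : Int) : List Int → List Nat
  | [] => []
  | x :: xs => if x == arg then 0 :: (pvOcc arg xs).map (· + 1) else (pvOcc arg xs).map (· + 1)

theorem pvOcc_lt {arg : Int} {d : List Int} {j : Nat} (h : j ∈ pvOcc arg d) : j < d.length := by
  induction d generalizing j with
  | nil => simp [pvOcc] at h
  | cons x xs ih =>
    simp only [pvOcc] at h
    have hmap : ∀ j', j' ∈ (pvOcc arg xs).map (· + 1) → j' < (x :: xs).length := by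
      intro j' hj'
      obtain ⟨k, hk, rfl⟩ := List.mem_map.mp hj'
      simpa using ih hk
    split at h
    · rcases List.mem_cons.mp h with rfl | h'
      · simp
      · exact hmap _ h'
    · exact hmap _ h

theorem pvGoA_eq (arg : Int) (d : List Int) (i c : Nat) (hc : c ≤ 1) :
    pvGoA arg d i c =
      match (pvOcc arg (d.drop i))[1 - c]? with
      | some j => d.eraseIdx (i + j)
      | none => d := by
  obtain ⟨n, hn⟩ : ∃ n, d.length - i ≤ n := ⟨_, le_rfl⟩
  induction n generalizing i c with
  | zero =>
    have hi : ¬ i < d.length := by omega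
    rw [pvGoA.eq_def]
    simp [hi, List.drop_eq_nil_of_le (by omega : d.length ≤ i), pvOcc]
  | succ n ih =>
    by_cases hi : i < d.length
    · have hdrop : d.drop i = d[i] :: d.drop (i + 1) := List.drop_eq_getElem_cons hi
      rw [pvGoA.eq_def]
      simp only [dif_pos hi, hdrop, pvOcc]
      by_cases hx : (d[i] == arg) = true
      · rw [if_pos hx, if_pos hx]
        interval_cases c
        · simp only [show (0 + 1 == 2) = false from rfl, if_neg Bool.false_ne_true,
            ih (i + 1) 1 (by omega) (by omega), Nat.sub_self,
            List.getElem?_cons_succ, Nat.sub_zero,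
            List.getElem?_map]
          rcases ht : (pvOcc arg (d.drop (i + 1)))[0]? with _ | j
          · simp
          · simp only [Option.map_some]
            exact congrArg _ (by omega)
        · rw [if_pos (by decide)]
          rw [show Int.ofNat i = ((i : Nat) : Int) from rfl, PySem.List.pop?_natCast (h := hi)]
          simp only [Nat.sub_self, List.getElem?_cons_zero]
          exact congrArg _ (by omega)
      · rw [if_neg hx, if_neg hx]
        rw [ih (i + 1) c hc (by omega), List.getElem?_map]
        rcases ht : (pvOcc arg (d.drop (i + 1)))[1 - c]? with _ | j
        · rfl
        · simp only [Option.map_some]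
          exact congrArg _ (by omega)
    · have hle : d.length ≤ i := by omega
      rw [pvGoA.eq_def]
      simp [hi, List.drop_eq_nil_of_le hle, pvOcc]

theorem pvIdx_eq (arg : Int) (d : List Int) (s : Int) :
    ((PySem.List.enumerate d s).filter (fun p => p.2 == arg)).map (·.1)
      = (pvOcc arg d).map (fun k : Nat => s + (k : Int)) := by
  induction d generalizing s with
  | nil => simp [PySem.List.enumerate_nil, pvOcc]
  | cons x xs ih =>
    have tail : ∀ s' : List Nat,
        s'.map ((fun k : Nat => s + (k : Int)) ∘ (fun k : Nat => k + 1)) = s'.map (fun k : Nat => (s + 1) + (k : Int)) :=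
      fun s' => List.map_congr_left (fun k _ => by simp only [Function.comp]; push_cast; ring)
    by_cases hx : (x == arg) = true
    · simp only [PySem.List.enumerate_cons, List.filter_cons, hx, if_pos, pvOcc,
        List.map_cons, List.map_map, ih, tail]
      exact List.cons_eq_cons.mpr ⟨by push_cast; ring, rfl⟩
    · simp only [PySem.List.enumerate_cons, List.filter_cons, hx, pvOcc,
        List.map_map, ih, tail, Bool.false_eq_true, ite_false]

theorem remove_second_occurance_spec : Claim_equal_remove_second_occurance := by
  intro data arg _
  unfold Spec_remove_second_occurance remove_second_occurance remove_second_occurance_alt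
  rw [pvGoA_eq arg data 0 0 (by omega), pvIdx_eq arg data 0]
  simp only [List.drop_zero]
  rcases ho : pvOcc arg data with _ | ⟨k0, _ | ⟨k1, rest⟩⟩
  · simp
  · simp
  · have hk1 : k1 < data.length := pvOcc_lt (ho ▸ (List.mem_cons_of_mem k0 (List.mem_cons_self ..)))
    simp only [List.map_cons, List.getElem!_cons_succ, List.getElem!_cons_zero,
      List.length_cons, zero_add, List.getElem?_cons_succ, List.getElem?_cons_zero]
    rw [if_pos (by omega), PySem.List.pop?_natCast (h := hk1)]
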